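-- pv_equiv track=rewrite | github.com/m1k0103/othelloBotWinner | sigma.py | move_up_valid
-- ===== SOURCE A (Python) =====
-- def opposite(player):
--     if player == "B":
--         return "W"
--     else:
--         return "B"
--
-- def move_up_valid(state, row, col, player):
--     opposite_player = opposite(player)
--     if row > 1:
--         saw_opposite = False
--         for y in range(row - 1, -1, -1):
--             if state[y][col] == "_":
--                 break
--             if state[y][col] == opposite_player:
--                 saw_opposite = True
--             if state[y][col] == player:
--                 if saw_opposite:
--                     return True
--                 else:
--                     break
--     return False
-- ===== SOURCE B (Python) =====
-- def move_up_valid(state, row, col, player):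
--     if row <= 1:
--         return False
--     opp = "W" if player == "B" else "B"
--     # phase 1: walk upward past non-stopping cells to the first blank or own piece
--     y = row - 1
--     while y >= 0 and state[y][col] != "_" and state[y][col] != player:
--         y -= 1
--     if y < 0 or state[y][col] == "_":
--         return False
--     # phase 2: valid iff an opponent piece sits strictly between the stop cell and row
--     return any(state[t][col] == opp for t in range(y + 1, row))
-- ===== Notes on version B (the rewrite author's own statement) =====
-- stated objective: alternative
-- what changed: B replaces A's single flag-carrying early-return scan by two flag-free phases: first advance y to the first blank-or-own stopping cell, then decide with one any() pass whether an opponent piece lies strictly between that cell and row; B performs exactly the same cell accesses as A, so it returns and raises exactly where A does.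
-- outside the precondition, e.g. on move_up_valid([[], ['_'], ['W']], 3, 0, 'B'): A returns False, B returns False
import Mathlib
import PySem

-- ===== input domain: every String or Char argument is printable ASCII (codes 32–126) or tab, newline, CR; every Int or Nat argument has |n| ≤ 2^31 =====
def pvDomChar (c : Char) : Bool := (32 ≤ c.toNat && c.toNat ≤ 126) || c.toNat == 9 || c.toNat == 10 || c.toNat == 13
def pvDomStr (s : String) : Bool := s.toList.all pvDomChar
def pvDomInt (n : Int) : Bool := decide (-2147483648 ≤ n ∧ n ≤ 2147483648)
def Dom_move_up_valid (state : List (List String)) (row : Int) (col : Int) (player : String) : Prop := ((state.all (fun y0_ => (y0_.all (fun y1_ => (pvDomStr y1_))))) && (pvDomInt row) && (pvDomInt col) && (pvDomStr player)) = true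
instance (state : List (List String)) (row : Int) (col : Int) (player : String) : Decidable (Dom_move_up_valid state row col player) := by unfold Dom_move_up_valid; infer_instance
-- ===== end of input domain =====

-- B restructures A's flag-carrying early-return scan into two flag-free phases: advance y to
-- the first blank-or-own stopping cell, then one any() pass for an opponent piece strictly
-- between that cell and row (objective: alternative decomposition, same cost, same accesses).


-- ===== PORT A =====
def opposite (player : String) : String :=
  if player == "B" then "W" else "B"

-- state[y][col]; none = IndexError (excluded by Pre_)
def cellA (state : List (List String)) (col : Int) (y : Int) : Option String :=
  (PySem.List.pyGet? state y).bind (fun r => PySem.List.pyGet? r col)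

-- the for-loop of A over the countdown range, carrying saw_opposite; none = IndexError
def muvLoopA (state : List (List String)) (col : Int) (player opp : String) :
    List Int → Bool → Option Bool
  | [], _ => some false
  | y :: ys, saw =>
    match cellA state col y with
    | none => none
    | some c =>
      if c == "_" then some false
      else
        let saw' := if c == opp then true else saw
        if c == player then some saw'
        else muvLoopA state col player opp ys saw'

def move_up_valid (state : List (List String)) (row : Int) (col : Int) (player : String) : Bool :=
  let opposite_player := opposite player
  if row > 1 then
    (muvLoopA state col player opposite_player (PySem.List.pyRange (row - 1) (-1) (-1)) false).getD false
  else false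

-- ===== PORT B =====
-- state[y][col] for B (own copy: the two ports share no definitions)
def cellB (state : List (List String)) (col : Int) (y : Int) : Option String :=
  (PySem.List.pyGet? state y).bind (fun r => PySem.List.pyGet? r col)

-- Source B's while loop 'while y >= 0 and state[y][col] != "_" and state[y][col] != player: y -= 1',
-- recursion on the Nat n with y = n - 1 (n = 0 is y = -1); none = IndexError
def muvFindB (state : List (List String)) (col : Int) (player : String) : Nat → Option Int
  | 0 => some (-1)
  | n + 1 =>
    match cellB state col (n : Int) with
    | none => none
    | some c => if c == "_" || c == player then some (n : Int) else muvFindB state col player n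

def move_up_valid_alt (state : List (List String)) (row : Int) (col : Int) (player : String) : Bool :=
  if row ≤ 1 then false
  else
    let opp := if player == "B" then "W" else "B"
    match muvFindB state col player row.toNat with   -- phase 1 starts at y = row - 1
    | none => false   -- IndexError inside the while loop; excluded by Pre_
    | some y =>
      if y < 0 ∨ cellB state col y = some "_" then false
      else (PySem.List.pyRange (y + 1) row 1).any (fun t => cellB state col t == some opp)

-- ===== PRECONDITION & SPEC =====
-- Pre_ conservatively requires column col to be in range for every row 0..row-1 (the cells A's
-- scan can touch and raise IndexError on); it thereby also excludes some ragged boards where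
-- both A and B stop at a blank before the bad cell and return the SAME value False (see cites).
def Pre_move_up_valid (state : List (List String)) (row : Int) (col : Int) (player : String) : Prop :=
  row > 1 → (row ≤ (state.length : Int) ∧
    ∀ r ∈ state.take row.toNat, -(r.length : Int) ≤ col ∧ col < (r.length : Int))
instance (state : List (List String)) (row : Int) (col : Int) (player : String) : Decidable (Pre_move_up_valid state row col player) := by unfold Pre_move_up_valid; infer_instance

def pvWitness_move_up_valid : List (List String) × Int × Int × String :=
  ([["B"], ["W"], ["W"], ["B"]], 4, 0, "B")

def Spec_move_up_valid (state : List (List String)) (row : Int) (col : Int) (player : String) (out : Bool) : Prop := out = move_up_valid_alt state row col player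
instance (state : List (List String)) (row : Int) (col : Int) (player : String) (out : Bool) : Decidable (Spec_move_up_valid state row col player out) := by unfold Spec_move_up_valid; infer_instance

-- ===== CLAIM (what is proved, stated in full; the proofs are below) =====
def Claim_equal_move_up_valid : Prop := ∀ (state : List (List String)) (row : Int) (col : Int) (player : String), Dom_move_up_valid state row col player → Pre_move_up_valid state row col player → Spec_move_up_valid state row col player (move_up_valid state row col player)

-- ===== LEMMAS AND PROOFS =====

-- the two cell readers are the same function
theorem cellA_eq_cellB : cellA = cellB := rfl

-- opp ≠ player for the opposite produced by either port
theorem opp_ne_player (player : String) : (if player = "B" then "W" else "B") ≠ player := by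
  by_cases h : player = "B"
  · subst h; decide
  · simp only [h, if_false]
    intro hc
    exact h hc.symm

-- phase 1 always returns under the in-range hypothesis, with -1 ≤ y < n
theorem muvFindB_some (state : List (List String)) (col : Int) (player : String) :
    ∀ n : Nat, (∀ k : Nat, k < n → (cellB state col (k : Int)).isSome) →
      ∃ y : Int, muvFindB state col player n = some y ∧ -1 ≤ y ∧ y < (n : Int) := by
  intro n
  induction n with
  | zero => exact fun _ => ⟨-1, rfl, by omega, by omega⟩
  | succ n ih =>
    intro h
    obtain ⟨c, hc⟩ := Option.isSome_iff_exists.mp (h n (Nat.lt_succ_self n))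
    by_cases hstop : (c == "_" || c == player) = true
    · exact ⟨(n : Int), by simp [muvFindB, hc, hstop], by omega, by push_cast; omega⟩
    · obtain ⟨y, hy, h1, h2⟩ := ih (fun k hk => h k (Nat.lt_succ_of_lt hk))
      refine ⟨y, ?_, h1, by push_cast; omega⟩
      simp [muvFindB, hc, hstop, hy]

-- core correspondence: A's flag loop computes B's stop-then-any decomposition
theorem loop_corr (state : List (List String)) (col : Int) (player : String) :
    ∀ (n : Nat) (saw : Bool), (∀ k : Nat, k < n → (cellA state col (k : Int)).isSome) →
      muvLoopA state col player (if player == "B" then "W" else "B")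
          (PySem.List.pyRange ((n : Int) - 1) (-1) (-1)) saw
        = (muvFindB state col player n).map (fun y =>
            if y < 0 then false
            else if cellA state col y = some "_" then false
            else saw || (PySem.List.pyRange (y + 1) (n : Int) 1).any
                (fun t => cellA state col t == some (if player == "B" then "W" else "B"))) := by
  intro n
  induction n with
  | zero =>
    intro saw _
    rw [PySem.List.pyRange_neg_one_eq_nil (by omega : ((0 : Nat) : Int) - 1 ≤ -1)]
    simp [muvLoopA, muvFindB]
  | succ n ih =>
    intro saw h
    have hcast : ((n + 1 : Nat) : Int) - 1 = (n : Int) := by push_cast; omega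
    rw [hcast, PySem.List.pyRange_neg_one_cons (by omega : (-1 : Int) < (n : Int))]
    obtain ⟨c, hc⟩ := Option.isSome_iff_exists.mp (h n (Nat.lt_succ_self n))
    have hcB : cellB state col (n : Int) = some c := hc
    have h0 : ¬ ((n : Int) < 0) := by omega
    simp only [muvLoopA, hc]
    by_cases hb : c = "_"
    · subst hb
      simp [muvFindB, hcB, hc, h0]
    · have hbne : (c == "_") = false := by simp [hb]
      by_cases hp : c = player
      · -- stop at own piece: A returns saw unchanged; B's any range is empty
        have hq : ¬ (c = if player = "B" then "W" else "B") := by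
          intro hcq; exact opp_ne_player player (hcq ▸ hp)
        have hnil : PySem.List.pyRange ((n : Int) + 1) ((n : Int) + 1) 1 = [] :=
          PySem.List.pyRange_one_eq_nil (le_refl _)
        simp [muvFindB, hcB, h0, hnil, hc, hp, Nat.cast_add, Nat.cast_one]
        have hbp : ¬ player = "_" := hp ▸ hb
        have hqp : ¬ player = (if player = "B" then "W" else "B") := hp ▸ hq
        simp [hbp, hqp]
      · -- pass-through cell: fold c into the flag / into the any range
        have hpne : (c == player) = false := by simp [hp]
        simp only [muvFindB, hcB, hbne, hpne, Bool.or_false, Bool.false_eq_true, if_false]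
        obtain ⟨y, hy, hy1, hy2⟩ := muvFindB_some state col player n
          (fun k hk => h k (Nat.lt_succ_of_lt hk))
        rw [ih _ (fun k hk => h k (Nat.lt_succ_of_lt hk)), hy]
        simp only [Option.map_some, Option.some.injEq]
        by_cases hneg : y < 0
        · simp [hneg]
        · by_cases hblank : cellA state col y = some "_"
          · simp [hneg, hblank]
          · have hsplit : PySem.List.pyRange (y + 1) ((n + 1 : Nat) : Int) 1
                = PySem.List.pyRange (y + 1) (n : Int) 1 ++ [(n : Int)] := by
              have hc1 : ((n + 1 : Nat) : Int) = (n : Int) + 1 := by push_cast; ring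
              rw [hc1]
              exact PySem.List.pyRange_one_succ_right (by omega)
            rw [hsplit, List.any_append]
            simp only [hneg, hblank, List.any_cons, List.any_nil,
              Bool.or_false, hc]
            by_cases hx : c = (if player = "B" then "W" else "B") <;> cases saw <;> simp [hx]

-- ===== VERDICT (by name: the statement is the Claim_ definition above) =====
theorem move_up_valid_spec : Claim_equal_move_up_valid := by
  intro state row col player _ hpre
  unfold Spec_move_up_valid move_up_valid move_up_valid_alt
  by_cases hr : row > 1
  · have hnle : ¬ row ≤ 1 := by omega
    simp only [hr, if_true, hnle, if_false]
    obtain ⟨hlen, hcol⟩ := hpre hr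
    have hall : ∀ k : Nat, k < row.toNat → (cellA state col (k : Int)).isSome := by
      intro k hk
      have h0 : (0 : Int) ≤ (k : Int) := by omega
      have h1 : (k : Int) < (state.length : Int) := by omega
      obtain ⟨r, hrq⟩ := Option.isSome_iff_exists.mp
        (by rw [Option.isSome_iff_ne_none, Ne, PySem.List.pyGet?_eq_none_iff,
              PySem.Raise.InRange]; omega :
          (PySem.List.pyGet? state (k : Int)).isSome)
      have hrm : r ∈ state.take row.toNat := by
        have := PySem.List.mem_of_pyGet?_eq_some (xs := state.take row.toNat) (i := (k : Int)) (x := r) ?_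
        · exact this
        · rw [PySem.List.pyGet?_of_nonneg _ h0] at hrq ⊢
          simp only [Int.toNat_natCast] at hrq ⊢
          rw [List.getElem?_take]
          simp only [hrq, if_pos hk]
      obtain ⟨hc1, hc2⟩ := hcol r hrm
      rw [cellA, hrq]
      simp only [Option.bind_some]
      rw [Option.isSome_iff_ne_none, Ne, PySem.List.pyGet?_eq_none_iff, PySem.Raise.InRange]
      omega
    have hrcast : row - 1 = ((row.toNat : Nat) : Int) - 1 := by omega
    rw [hrcast, show opposite player = (if player == "B" then "W" else "B") from rfl,
      loop_corr state col player row.toNat false hall]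
    obtain ⟨y, hy, hy1, hy2⟩ := muvFindB_some state col player row.toNat
      (fun k hk => (cellA_eq_cellB ▸ hall) k hk)
    rw [hy]
    simp only [Option.map_some, Option.getD_some, Bool.false_or, ← cellA_eq_cellB]
    have hncast : ((row.toNat : Nat) : Int) = row := by omega
    rw [hncast]
    by_cases hneg : y < 0
    · rw [if_pos hneg, if_pos (Or.inl hneg)]
    · rw [if_neg hneg]
      by_cases hblank : cellA state col y = some "_"
      · rw [if_pos hblank, if_pos (Or.inr hblank)]
      · rw [if_neg hblank, if_neg (by tauto : ¬ (y < 0 ∨ cellA state col y = some "_"))]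
  · have hle : row ≤ 1 := by omega
    simp [hr, hle]
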